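-- pv_equiv track=rewrite | github.com/ultimafounding/PicoMol | src/core/enhanced_pdb_puller.py | _parse_fasta_chains
-- ===== SOURCE A (Python) =====
-- from typing import Dict, List, Optional, Any
--
-- def _parse_fasta_chains(fasta_content: str) -> List[Dict[str, str]]:
--     """Parse FASTA content to extract chain information."""
--     chains = []
--     current_chain = None
--
--     for line in fasta_content.split('\n'):
--         line = line.strip()
--         if line.startswith('>'):
--             if current_chain:
--                 chains.append(current_chain)
--
--             # Parse header
--             header = line[1:]
--             parts = header.split('|')
--
--             current_chain = {
--                 'header': header,
--                 'sequence': '',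
--                 'chain_id': '',
--                 'description': ''
--             }
--
--             # Extract chain ID and description
--             if len(parts) >= 2:
--                 current_chain['chain_id'] = parts[0].split('_')[-1] if '_' in parts[0] else ''
--                 current_chain['description'] = parts[1] if len(parts) > 1 else ''
--
--         elif line and current_chain:
--             current_chain['sequence'] += line
--
--     if current_chain:
--         chains.append(current_chain)
--
--     return chains
-- ===== SOURCE B (Python) =====
-- def _parse_fasta_chains(fasta_content):
--     """Parse FASTA content to extract chain information (group records, then build dicts)."""
--     lines = [ln.strip() for ln in fasta_content.split('\n')]
--     records = []
--     for ln in lines: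
--         if ln.startswith('>'):
--             records.append((ln[1:], []))
--         elif ln and records:
--             records[-1][1].append(ln)
--     out = []
--     for header, seq_lines in records:
--         parts = header.split('|')
--         chain_id = ''
--         description = ''
--         if len(parts) >= 2:
--             chain_id = parts[0].split('_')[-1] if '_' in parts[0] else ''
--             description = parts[1]
--         out.append({'header': header,
--                     'sequence': ''.join(seq_lines),
--                     'chain_id': chain_id,
--                     'description': description})
--     return out
-- ===== Notes on version B (the rewrite author's own statement) =====
-- stated objective: alternative
-- what changed: Replaces A's single stateful loop (current_chain dict mutated and flushed into the result) with a two-pass group-then-build: one pass groups stripped lines into (header, sequence-lines) records, a second pass maps each record to its output dict, joining the sequence lines at the end.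
import Mathlib
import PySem

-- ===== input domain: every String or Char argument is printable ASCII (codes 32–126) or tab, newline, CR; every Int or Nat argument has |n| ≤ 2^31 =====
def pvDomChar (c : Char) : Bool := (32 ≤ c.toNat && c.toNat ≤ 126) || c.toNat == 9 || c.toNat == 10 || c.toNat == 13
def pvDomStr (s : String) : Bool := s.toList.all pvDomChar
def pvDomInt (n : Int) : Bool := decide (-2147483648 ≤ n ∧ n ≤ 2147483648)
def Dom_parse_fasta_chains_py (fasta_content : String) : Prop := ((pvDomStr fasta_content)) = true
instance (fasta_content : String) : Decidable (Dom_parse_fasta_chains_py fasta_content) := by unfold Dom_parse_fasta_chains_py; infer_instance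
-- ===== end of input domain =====

-- B re-implements the parser as group-then-build: one pass grouping lines into (header, sequence-lines) records, then a map building each output dict; same return value, 'alternative' objective.

-- ===== PORT A =====
-- dict built at a '>' header line (literal dict then the two conditional overwrites)
def pvChainDictA (line : String) : PySem.Dict String String :=
  let header := PySem.Str.slice line (some 1) none
  let parts := (PySem.Str.split? header "|").getD []
  let d := PySem.Dict.mk [("header", header), ("sequence", ""), ("chain_id", ""), ("description", "")]
  if parts.length ≥ 2 then
    let d := d.insert "chain_id"
      (if PySem.Str.isIn "_" ((PySem.List.pyGet? parts 0).getD "") then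
        (PySem.List.pyGet? ((PySem.Str.split? ((PySem.List.pyGet? parts 0).getD "") "_").getD []) (-1)).getD ""
      else "")
    d.insert "description" (if parts.length > 1 then (PySem.List.pyGet? parts 1).getD "" else "")
  else d

-- one iteration of A's loop over the raw lines (state: chains so far, current_chain)
def pvStepA (st : List (PySem.Dict String String) × Option (PySem.Dict String String)) (rawLine : String) :
    List (PySem.Dict String String) × Option (PySem.Dict String String) :=
  let line := PySem.Str.strip rawLine
  if PySem.Str.startswith line ">" then
    ((match st.2 with | some c => st.1 ++ [c] | none => st.1), some (pvChainDictA line))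
  else if line ≠ "" then
    match st.2 with
    | some c => (st.1, some (c.insert "sequence" (c.getD "sequence" "" ++ line)))
    | none => st
  else st

def parse_fasta_chains_py (fasta_content : String) : List (List (String × String)) :=
  let st := ((PySem.Str.split? fasta_content "\n").getD []).foldl pvStepA ([], none)
  let chains := match st.2 with | some c => st.1 ++ [c] | none => st.1
  chains.map PySem.Dict.items

-- ===== PORT B =====
-- grouping pass: start a record at each header line, append other non-empty lines to the last record
def pvRecStep (rs : List (String × List String)) (line : String) : List (String × List String) :=
  if PySem.Str.startswith line ">" then
    rs ++ [(PySem.Str.slice line (some 1) none, [])]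
  else if line ≠ "" then
    match rs.getLast? with
    | some r => rs.dropLast ++ [(r.1, r.2 ++ [line])]
    | none => rs
  else rs

-- building pass: one record to one output dict
def pvBuildChain (r : String × List String) : List (String × String) :=
  let parts := (PySem.Str.split? r.1 "|").getD []
  let chain_id := if parts.length ≥ 2 then
      (if PySem.Str.isIn "_" ((PySem.List.pyGet? parts 0).getD "") then
        (PySem.List.pyGet? ((PySem.Str.split? ((PySem.List.pyGet? parts 0).getD "") "_").getD []) (-1)).getD ""
      else "")
    else ""
  let description := if parts.length ≥ 2 then (PySem.List.pyGet? parts 1).getD "" else ""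
  [("header", r.1), ("sequence", PySem.Str.join "" r.2), ("chain_id", chain_id), ("description", description)]

def parse_fasta_chains_py_alt (fasta_content : String) : List (List (String × String)) :=
  let lines := ((PySem.Str.split? fasta_content "\n").getD []).map PySem.Str.strip
  (lines.foldl pvRecStep []).map pvBuildChain

-- ===== PRECONDITION & SPEC =====
def Spec_parse_fasta_chains_py (fasta_content : String) (out : List (List (String × String))) : Prop := out = parse_fasta_chains_py_alt fasta_content
instance (fasta_content : String) (out : List (List (String × String))) : Decidable (Spec_parse_fasta_chains_py fasta_content out) := by unfold Spec_parse_fasta_chains_py; infer_instance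

-- ===== CLAIM (what is proved, stated in full; the proofs are below) =====
def Claim_equal_parse_fasta_chains_py : Prop := ∀ (fasta_content : String), Dom_parse_fasta_chains_py fasta_content → Spec_parse_fasta_chains_py fasta_content (parse_fasta_chains_py fasta_content)

-- ===== LEMMAS AND PROOFS =====
-- B's record, viewed as the dict A would hold for it
def pvDictOf (r : String × List String) : PySem.Dict String String := PySem.Dict.mk (pvBuildChain r)

lemma pv_flatten_intersperse_nil {α : Type} (l : List (List α)) :
    (List.intersperse [] l).flatten = l.flatten := by
  induction l with
  | nil => rfl
  | cons a t ih =>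
    cases t with
    | nil => rfl
    | cons b t' => simp [List.intersperse] at ih ⊢; simpa using ih

lemma pv_join_nil : PySem.Str.join "" ([] : List String) = "" := by decide

lemma pv_join_snoc (ss : List String) (x : String) :
    PySem.Str.join "" (ss ++ [x]) = PySem.Str.join "" ss ++ x := by
  apply String.ext
  simp [PySem.Str.join, PySem.Chars.join, List.intercalate, pv_flatten_intersperse_nil]

set_option maxHeartbeats 1000000 in
lemma pv_chainDictA_eq (line : String) :
    pvChainDictA line = pvDictOf (PySem.Str.slice line (some 1) none, []) := by
  apply PySem.Dict.ext
  by_cases h : 2 ≤ ((PySem.Str.split? (PySem.Str.slice line (some 1) none) "|").getD []).length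
  · simp [pvChainDictA, pvDictOf, pvBuildChain, PySem.Dict.insert, pv_join_nil, h]
    intro h2
    omega
  · simp [pvChainDictA, pvDictOf, pvBuildChain, pv_join_nil, h]

set_option maxHeartbeats 1000000 in
lemma pv_seq_insert (r : String × List String) (line : String) :
    (pvDictOf r).insert "sequence" ((pvDictOf r).getD "sequence" "" ++ line) =
      pvDictOf (r.1, r.2 ++ [line]) := by
  apply PySem.Dict.ext
  simp [pvDictOf, pvBuildChain, PySem.Dict.insert, PySem.Dict.getD, PySem.Dict.get?, pv_join_snoc]
  rfl

lemma pv_dropLast_append_getLast {α : Type} (rs : List α) :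
    rs.dropLast ++ rs.getLast?.toList = rs := by
  cases h : rs.getLast? with
  | none => simp [List.getLast?_eq_none_iff.mp h]
  | some a => exact List.dropLast_append_getLast? a (by simp [h])

lemma pv_step_eq (rs : List (String × List String)) (x : String) :
    pvStepA (rs.dropLast.map pvDictOf, rs.getLast?.map pvDictOf) x =
      ((pvRecStep rs (PySem.Str.strip x)).dropLast.map pvDictOf,
       (pvRecStep rs (PySem.Str.strip x)).getLast?.map pvDictOf) := by
  unfold pvStepA pvRecStep
  generalize PySem.Str.strip x = line
  by_cases hgt : PySem.Str.startswith line ">" = true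
  · rw [if_pos hgt, if_pos hgt]
    cases hlast : rs.getLast? with
    | none =>
      have hrs := List.getLast?_eq_none_iff.mp hlast
      subst hrs
      simp [pv_chainDictA_eq]
    | some r =>
      have hfull : rs.dropLast.map pvDictOf ++ [pvDictOf r] = rs.map pvDictOf := by
        calc rs.dropLast.map pvDictOf ++ [pvDictOf r]
            = (rs.dropLast ++ rs.getLast?.toList).map pvDictOf := by simp [hlast]
          _ = rs.map pvDictOf := by rw [pv_dropLast_append_getLast]
      dsimp only [Option.map_some]
      rw [List.dropLast_concat, List.getLast?_concat, Prod.ext_iff]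
      constructor
      · exact hfull
      · simp [pv_chainDictA_eq]
  · rw [if_neg hgt, if_neg hgt]
    by_cases hne : line = ""
    · subst hne
      rw [if_neg (show ¬(("" : String) ≠ "") by simp), if_neg (show ¬(("" : String) ≠ "") by simp)]
    · rw [if_pos (show line ≠ "" from hne), if_pos (show line ≠ "" from hne)]
      cases hlast : rs.getLast? with
      | none =>
        have hrs := List.getLast?_eq_none_iff.mp hlast
        subst hrs
        rfl
      | some r =>
        dsimp only [Option.map_some]
        rw [pv_seq_insert, List.dropLast_concat, List.getLast?_concat]
        rfl

lemma pv_invariant (l : List String) (rs : List (String × List String)) :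
    l.foldl pvStepA (rs.dropLast.map pvDictOf, rs.getLast?.map pvDictOf) =
      (((l.map PySem.Str.strip).foldl pvRecStep rs).dropLast.map pvDictOf,
       ((l.map PySem.Str.strip).foldl pvRecStep rs).getLast?.map pvDictOf) := by
  induction l generalizing rs with
  | nil => rfl
  | cons x t ih =>
    simp only [List.foldl_cons, List.map_cons]
    rw [pv_step_eq, ih]

lemma pv_final (recs : List (String × List String)) :
    (match (recs.getLast?.map pvDictOf : Option (PySem.Dict String String)) with
      | some c => recs.dropLast.map pvDictOf ++ [c]
      | none => recs.dropLast.map pvDictOf).map PySem.Dict.items = recs.map pvBuildChain := by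
  cases hlast : recs.getLast? with
  | none =>
    have hrs := List.getLast?_eq_none_iff.mp hlast
    subst hrs
    rfl
  | some r =>
    have hfull : recs.dropLast.map pvDictOf ++ [pvDictOf r] = recs.map pvDictOf := by
      calc recs.dropLast.map pvDictOf ++ [pvDictOf r]
          = (recs.dropLast ++ recs.getLast?.toList).map pvDictOf := by simp [hlast]
        _ = recs.map pvDictOf := by rw [pv_dropLast_append_getLast]
    simp only [Option.map_some]
    rw [hfull]
    simp [pvDictOf, List.map_map, Function.comp_def]

theorem pv_main (s : String) : parse_fasta_chains_py s = parse_fasta_chains_py_alt s := by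
  unfold parse_fasta_chains_py parse_fasta_chains_py_alt
  have h := pv_invariant ((PySem.Str.split? s "\n").getD []) []
  simp only [List.dropLast_nil, List.map_nil, List.getLast?_nil, Option.map_none] at h
  simp only [h]
  exact pv_final _

-- ===== VERDICT (by name: the statement is the Claim_ definition above) =====
theorem parse_fasta_chains_py_spec : Claim_equal_parse_fasta_chains_py := by
  intro s _
  unfold Spec_parse_fasta_chains_py
  exact pv_main s
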